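-- pv_equiv track=rewrite | github.com/assignments-for-discussion/battery-inventory-in-py-Pranay110201 | main.py | count_batteries_by_usage
-- ===== SOURCE A (Python) =====
-- def count_batteries_by_usage(cycles):
-- #   Variables to keep count of various categories of batteries
--   lowcount=0
--   mediumcount=0
--   highcount=0
-- #   loop to iterate through the input values present in cycles
--   for cycle in cycles:
-- #     condition to check and categorize them based of the cycles
--     if(cycle<410):
--       lowcount+=1
--     elif(cycle>=410 and cycle<909):
--       mediumcount+=1
--     else:
--       highcount+=1
-- #    returning the count of each catergories of the batteries.
--   return {
--     "lowCount": lowcount,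
--     "mediumCount": mediumcount,
--     "highCount": highcount
--   }
-- ===== SOURCE B (Python) =====
-- def count_batteries_by_usage(cycles):
--     data = list(cycles)
--     low = sum(1 for c in data if c < 410)
--     medium = sum(1 for c in data if 410 <= c < 909)
--     return {
--         "lowCount": low,
--         "mediumCount": medium,
--         "highCount": len(data) - low - medium,
--     }
-- ===== Notes on version B (the rewrite author's own statement) =====
-- stated objective: idiomatic
-- what changed: Replaces the single loop with three mutable counters by two independent counting comprehensions, deriving the high bucket by subtraction from the length.
import Mathlib
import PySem

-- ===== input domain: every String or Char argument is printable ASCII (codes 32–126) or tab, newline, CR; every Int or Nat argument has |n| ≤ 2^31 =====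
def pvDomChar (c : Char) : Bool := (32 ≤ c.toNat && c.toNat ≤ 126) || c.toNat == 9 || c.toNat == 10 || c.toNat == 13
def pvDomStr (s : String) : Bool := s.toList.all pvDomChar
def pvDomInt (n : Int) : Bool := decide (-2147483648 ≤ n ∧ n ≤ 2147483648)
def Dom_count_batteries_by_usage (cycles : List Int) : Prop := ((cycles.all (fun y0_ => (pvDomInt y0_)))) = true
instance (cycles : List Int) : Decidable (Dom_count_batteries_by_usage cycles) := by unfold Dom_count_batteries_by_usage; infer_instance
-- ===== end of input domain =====

-- B replaces A's single loop with three mutable counters by two counting scans,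
-- getting the high bucket by subtraction from the length (objective: idiomatic).

-- ===== PORT A =====
-- the loop over cycles with three counters, as a fold over the triple state
def count_batteries_by_usage (cycles : List Int) : List (String × Int) :=
  let s := cycles.foldl (fun (st : Int × Int × Int) cycle =>
    if cycle < 410 then (st.1 + 1, st.2.1, st.2.2)
    else if 410 ≤ cycle ∧ cycle < 909 then (st.1, st.2.1 + 1, st.2.2)
    else (st.1, st.2.1, st.2.2 + 1)) (0, 0, 0)
  [("lowCount", s.1), ("mediumCount", s.2.1), ("highCount", s.2.2)]

-- ===== PORT B =====
def count_batteries_by_usage_alt (cycles : List Int) : List (String × Int) :=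
  let low : Int := cycles.countP (fun c => c < 410)
  let medium : Int := cycles.countP (fun c => 410 ≤ c ∧ c < 909)
  [("lowCount", low), ("mediumCount", medium),
   ("highCount", (cycles.length : Int) - low - medium)]

-- ===== PRECONDITION & SPEC =====
def Spec_count_batteries_by_usage (cycles : List Int) (out : List (String × Int)) : Prop := out = count_batteries_by_usage_alt cycles
instance (cycles : List Int) (out : List (String × Int)) : Decidable (Spec_count_batteries_by_usage cycles out) := by unfold Spec_count_batteries_by_usage; infer_instance

-- ===== CLAIM (what is proved, stated in full; the proofs are below) =====
def Claim_equal_count_batteries_by_usage : Prop := ∀ (cycles : List Int), Dom_count_batteries_by_usage cycles → Spec_count_batteries_by_usage cycles (count_batteries_by_usage cycles)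

-- ===== LEMMAS AND PROOFS =====
lemma cbu_fold_inv (cycles : List Int) (a b c : Int) :
    cycles.foldl (fun (st : Int × Int × Int) cycle =>
      if cycle < 410 then (st.1 + 1, st.2.1, st.2.2)
      else if 410 ≤ cycle ∧ cycle < 909 then (st.1, st.2.1 + 1, st.2.2)
      else (st.1, st.2.1, st.2.2 + 1)) (a, b, c)
    = (a + (cycles.countP (fun x => decide (x < 410)) : Int),
       b + (cycles.countP (fun x => decide (410 ≤ x ∧ x < 909)) : Int),
       c + ((cycles.length : Int)
            - cycles.countP (fun x => decide (x < 410))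
            - cycles.countP (fun x => decide (410 ≤ x ∧ x < 909)))) := by
  induction cycles generalizing a b c with
  | nil => simp
  | cons x xs ih =>
    by_cases h1 : x < 410
    · have h2 : ¬ (410 ≤ x ∧ x < 909) := by omega
      have d1 : decide (x < 410) = true := by simp [h1]
      have d2 : decide (410 ≤ x ∧ x < 909) = false := by simp; omega
      simp only [List.foldl_cons, if_pos h1, ih, List.countP_cons, List.length_cons,
        d1, d2, if_true, Bool.false_eq_true, if_false, Prod.mk.injEq]
      refine ⟨by push_cast; ring, by push_cast; ring, by push_cast; ring⟩
    · by_cases h2 : 410 ≤ x ∧ x < 909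
      · have d1 : decide (x < 410) = false := by simp [h1]
        have d2 : decide (410 ≤ x ∧ x < 909) = true := by simp [h2]
        simp only [List.foldl_cons, if_neg h1, if_pos h2, ih, List.countP_cons,
          List.length_cons, d1, d2, if_true, Bool.false_eq_true, if_false, Prod.mk.injEq]
        refine ⟨by push_cast; ring, by push_cast; ring, by push_cast; ring⟩
      · have d1 : decide (x < 410) = false := by simp [h1]
        have d2 : decide (410 ≤ x ∧ x < 909) = false := by simp [h2]
        simp only [List.foldl_cons, if_neg h1, if_neg h2, ih, List.countP_cons,
          List.length_cons, d1, d2, if_true, Bool.false_eq_true, if_false, Prod.mk.injEq]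
        refine ⟨by push_cast; ring, by push_cast; ring, by push_cast; ring⟩

-- ===== VERDICT (by name: the statement is the Claim_ definition above) =====
theorem count_batteries_by_usage_spec : Claim_equal_count_batteries_by_usage := by
  intro cycles _
  unfold Spec_count_batteries_by_usage count_batteries_by_usage count_batteries_by_usage_alt
  simp only [cbu_fold_inv, zero_add]
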